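-- pv_equiv track=rewrite | github.com/mandakan/bodn-esp32 | firmware/bodn/qr.py | _penalty
-- ===== SOURCE A (Python) =====
-- def _penalty(matrix, size):
--     """Simplified penalty score for mask selection."""
--     score = 0
--     # Rule 1: runs of same color
--     for r in range(size):
--         run = 1
--         for c in range(1, size):
--             if matrix[r][c] == matrix[r][c - 1]:
--                 run += 1
--             else:
--                 if run >= 5:
--                     score += run - 2
--                 run = 1
--         if run >= 5:
--             score += run - 2
--     for c in range(size):
--         run = 1
--         for r in range(1, size):
--             if matrix[r][c] == matrix[r - 1][c]:
--                 run += 1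
--             else:
--                 if run >= 5:
--                     score += run - 2
--                 run = 1
--         if run >= 5:
--             score += run - 2
--     return score
-- ===== SOURCE B (Python) =====
-- def _penalty(matrix, size):
--     """Simplified penalty score for mask selection."""
--     # Counts length-5 same-color windows (+1 each) plus a +2 bonus at each
--     # window that starts a run; for a run of length L>=5 that is (L-4)+2 = L-2.
--     score = 0
--     for r in range(size):
--         for c in range(size - 4):
--             if matrix[r][c] == matrix[r][c + 1] == matrix[r][c + 2] == matrix[r][c + 3] == matrix[r][c + 4]:
--                 score += 1
--                 if c == 0 or matrix[r][c - 1] != matrix[r][c]: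
--                     score += 2
--     for c in range(size):
--         for r in range(size - 4):
--             if matrix[r][c] == matrix[r + 1][c] == matrix[r + 2][c] == matrix[r + 3][c] == matrix[r + 4][c]:
--                 score += 1
--                 if r == 0 or matrix[r - 1][c] != matrix[r][c]:
--                     score += 2
--     return score
-- ===== Notes on version B (the rewrite author's own statement) =====
-- stated objective: alternative
-- what changed: B maintains no run counter at all: it counts every length-5 same-color window (+1) and adds +2 at each window that starts a run (left edge or color change before it), which totals (L-4)+2 = L-2 per run of length L>=5, matching A's run-counting rule.
import Mathlib
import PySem

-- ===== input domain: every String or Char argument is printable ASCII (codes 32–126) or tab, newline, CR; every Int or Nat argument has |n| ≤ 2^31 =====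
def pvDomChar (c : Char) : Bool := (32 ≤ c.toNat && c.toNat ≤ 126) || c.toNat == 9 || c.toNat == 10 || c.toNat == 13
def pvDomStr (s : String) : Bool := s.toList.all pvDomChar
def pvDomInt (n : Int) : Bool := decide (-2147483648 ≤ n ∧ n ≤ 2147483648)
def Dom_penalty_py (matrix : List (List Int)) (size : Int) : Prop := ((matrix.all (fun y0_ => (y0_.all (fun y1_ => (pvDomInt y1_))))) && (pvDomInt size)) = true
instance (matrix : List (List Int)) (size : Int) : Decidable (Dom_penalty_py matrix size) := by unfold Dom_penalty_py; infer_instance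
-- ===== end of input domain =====

-- B scores by a different rule than A's run counter: it counts every length-5 same-color
-- window (+1) and adds +2 at each window that starts a run; per run of length L ≥ 5 that is
-- (L-4)+2 = L-2, the same total. Alternative algorithm, same O(size^2) cost.

-- ===== PORT A =====
def penalty_py (matrix : List (List Int)) (size : Int) : Int :=
  let s1 := (PySem.List.pyRange 0 size 1).foldl (fun score r =>
      let st := (PySem.List.pyRange 1 size 1).foldl (fun (p : Int × Int) c =>
          if PySem.List.pyGetD (PySem.List.pyGetD matrix r []) c 0
             = PySem.List.pyGetD (PySem.List.pyGetD matrix r []) (c - 1) 0 then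
            (p.1, p.2 + 1)
          else
            ((if p.2 ≥ 5 then p.1 + p.2 - 2 else p.1), 1)) (score, 1)
      if st.2 ≥ 5 then st.1 + st.2 - 2 else st.1) 0
  (PySem.List.pyRange 0 size 1).foldl (fun score c =>
      let st := (PySem.List.pyRange 1 size 1).foldl (fun (p : Int × Int) r =>
          if PySem.List.pyGetD (PySem.List.pyGetD matrix r []) c 0
             = PySem.List.pyGetD (PySem.List.pyGetD matrix (r - 1) []) c 0 then
            (p.1, p.2 + 1)
          else
            ((if p.2 ≥ 5 then p.1 + p.2 - 2 else p.1), 1)) (score, 1)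
      if st.2 ≥ 5 then st.1 + st.2 - 2 else st.1) s1

-- ===== PORT B =====
-- matrix[r][c]
def mget (matrix : List (List Int)) (r c : Int) : Int :=
  PySem.List.pyGetD (PySem.List.pyGetD matrix r []) c 0

def penalty_py_alt (matrix : List (List Int)) (size : Int) : Int :=
  let s1 := (PySem.List.pyRange 0 size 1).foldl (fun score r =>
      (PySem.List.pyRange 0 (size - 4) 1).foldl (fun score c =>
        if mget matrix r c = mget matrix r (c + 1) ∧ mget matrix r (c + 1) = mget matrix r (c + 2)
            ∧ mget matrix r (c + 2) = mget matrix r (c + 3) ∧ mget matrix r (c + 3) = mget matrix r (c + 4) then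
          -- score += 1; if c == 0 or matrix[r][c-1] != matrix[r][c]: score += 2
          if c = 0 ∨ mget matrix r (c - 1) ≠ mget matrix r c then score + 1 + 2 else score + 1
        else score) score) 0
  (PySem.List.pyRange 0 size 1).foldl (fun score c =>
      (PySem.List.pyRange 0 (size - 4) 1).foldl (fun score r =>
        if mget matrix r c = mget matrix (r + 1) c ∧ mget matrix (r + 1) c = mget matrix (r + 2) c
            ∧ mget matrix (r + 2) c = mget matrix (r + 3) c ∧ mget matrix (r + 3) c = mget matrix (r + 4) c then
          if r = 0 ∨ mget matrix (r - 1) c ≠ mget matrix r c then score + 1 + 2 else score + 1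
        else score) score) s1

-- ===== PRECONDITION & SPEC =====
-- Pre_ excludes exactly the inputs on which A raises IndexError: size ≥ 2 with fewer than
-- size rows, or one of the first size rows shorter than size.
def Pre_penalty_py (matrix : List (List Int)) (size : Int) : Prop :=
  size ≤ 1 ∨ (size ≤ matrix.length ∧ ∀ row ∈ matrix.take size.toNat, size ≤ row.length)
instance (matrix : List (List Int)) (size : Int) : Decidable (Pre_penalty_py matrix size) := by
  unfold Pre_penalty_py; infer_instance

def pvWitness_penalty_py : List (List Int) × Int :=
  ([[1,1,1,1,1],[0,1,0,1,0],[1,0,1,0,1],[0,1,0,1,0],[1,1,1,1,1]], 5)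

def Spec_penalty_py (matrix : List (List Int)) (size : Int) (out : Int) : Prop := out = penalty_py_alt matrix size
instance (matrix : List (List Int)) (size : Int) (out : Int) : Decidable (Spec_penalty_py matrix size out) := by unfold Spec_penalty_py; infer_instance

-- ===== CLAIM (what is proved, stated in full; the proofs are below) =====
def Claim_equal_penalty_py : Prop := ∀ (matrix : List (List Int)) (size : Int), Dom_penalty_py matrix size → Pre_penalty_py matrix size → Spec_penalty_py matrix size (penalty_py matrix size)

-- ===== LEMMAS AND PROOFS =====

-- ---- A-side: the per-line run machine, characterised by run lengths ----

-- A's per-line state machine, abstracted over the line l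
def stepLine (l : List Int) (p : Int × Int) (c : Int) : Int × Int :=
  if PySem.List.pyGetD l c 0 = PySem.List.pyGetD l (c - 1) 0 then (p.1, p.2 + 1)
  else ((if p.2 ≥ 5 then p.1 + p.2 - 2 else p.1), 1)

def tailAdd (p : Int × Int) : Int := if p.2 ≥ 5 then p.1 + p.2 - 2 else p.1

-- A's per-line recursion, as a structural recursion over the rest of the line
def lineF (cur run sc : Int) : List Int → Int
  | [] => if run ≥ 5 then sc + run - 2 else sc
  | y :: ys => if y = cur then lineF cur (run + 1) sc ys
               else lineF y 1 (if run ≥ 5 then sc + run - 2 else sc) ys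

-- run lengths of consecutive equal elements
def runsGo (cur : Int) (run : Nat) : List Int → List Nat
  | [] => [run]
  | y :: ys => if y = cur then runsGo cur (run + 1) ys else run :: runsGo y 1 ys

def runLengths : List Int → List Nat
  | [] => []
  | x :: xs => runsGo x 1 xs

-- "if run >= 5: s += run - 2" applied to one group
def scoreStep (s : Int) (r : Nat) : Int := if r ≥ 5 then s + (r : Int) - 2 else s

def lineScore (l : List Int) : Int := (runLengths l).foldl scoreStep 0

theorem pyGetD_nat {α : Type} (l : List α) (d : α) (k : Nat) (hk : k < l.length) :
    PySem.List.pyGetD l (k : Int) d = l[k] := by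
  simp [List.getD_eq_getElem?_getD, List.getElem?_eq_getElem hk]

theorem inner_eq (m : Nat) : ∀ (l : List Int) (k : Nat), l.length - (k + 1) = m →
    ∀ (hk : k < l.length) (sc run : Int),
    tailAdd ((PySem.List.pyRange ((k : Int) + 1) (l.length : Int) 1).foldl (stepLine l) (sc, run))
      = lineF (l[k]'hk) run sc (l.drop (k + 1)) := by
  induction m with
  | zero =>
    intro l k hm hk sc run
    rw [PySem.List.pyRange_one_eq_nil (by omega)]
    rw [List.drop_eq_nil_of_le (by omega)]
    simp [tailAdd, lineF]
  | succ m ih =>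
    intro l k hm hk sc run
    have hk1 : k + 1 < l.length := by omega
    rw [PySem.List.pyRange_one_cons (by exact_mod_cast by omega)]
    rw [List.foldl_cons]
    have hdrop : l.drop (k + 1) = l[k + 1] :: l.drop (k + 2) := (List.getElem_cons_drop hk1).symm
    have hget : PySem.List.pyGetD l ((k : Int) + 1) 0 = l[k + 1] := by
      rw [show ((k : Int) + 1) = ((k + 1 : Nat) : Int) by push_cast; ring]
      exact pyGetD_nat l 0 (k + 1) hk1
    have hget' : PySem.List.pyGetD l ((k : Int) + 1 - 1) 0 = l[k] := by
      rw [show ((k : Int) + 1 - 1) = ((k : Nat) : Int) by ring]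
      exact pyGetD_nat l 0 k hk
    rw [hdrop]
    simp only [lineF, stepLine, hget, hget']
    by_cases he : l[k + 1] = l[k]
    · simp only [he, if_true]
      have h2 := ih l (k + 1) (by omega) hk1 sc (run + 1)
      rw [show ((k : Int) + 1 + 1) = ((k + 1 : Nat) : Int) + 1 by push_cast; ring]
      rw [h2, he]
    · simp only [if_neg he]
      have h2 := ih l (k + 1) (by omega) hk1 (if run ≥ 5 then sc + run - 2 else sc) 1
      rw [show ((k : Int) + 1 + 1) = ((k + 1 : Nat) : Int) + 1 by push_cast; ring]
      rw [h2]

theorem foldl_score_shift (rs : List Nat) : ∀ (a : Int),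
    rs.foldl scoreStep a = a + rs.foldl scoreStep 0 := by
  induction rs with
  | nil => intro a; simp
  | cons r rs ih =>
    intro a
    rw [List.foldl_cons, List.foldl_cons, ih (scoreStep a r), ih (scoreStep 0 r)]
    simp only [scoreStep]
    split_ifs <;> ring

theorem lineF_eq_runs (ys : List Int) : ∀ (cur : Int) (run : Nat) (sc : Int),
    lineF cur (run : Int) sc ys = sc + (runsGo cur run ys).foldl scoreStep 0 := by
  induction ys with
  | nil =>
    intro cur run sc
    simp only [lineF, runsGo, List.foldl_cons, List.foldl_nil, scoreStep]
    have : ((run : Int) ≥ 5) ↔ (run ≥ 5) := by omega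
    split_ifs with h1 h2 h2 <;> [ring; omega; omega; ring]
  | cons y ys ih =>
    intro cur run sc
    simp only [lineF, runsGo]
    by_cases he : y = cur
    · simp only [if_pos he]
      rw [show ((run : Int) + 1) = ((run + 1 : Nat) : Int) by push_cast; ring, ih]
    · simp only [if_neg he]
      rw [show (1 : Int) = ((1 : Nat) : Int) by norm_num, ih]
      rw [List.foldl_cons, foldl_score_shift (runsGo y 1 ys) (scoreStep 0 run)]
      simp only [scoreStep]
      have : ((run : Int) ≥ 5) ↔ (run ≥ 5) := by omega
      split_ifs with h1 h2 h2 <;> [ring; omega; omega; ring]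

theorem line_eq (l : List Int) (hl : l ≠ []) (sc : Int) :
    tailAdd ((PySem.List.pyRange 1 (l.length : Int) 1).foldl (stepLine l) (sc, 1))
      = sc + lineScore l := by
  match l, hl with
  | x :: xs, _ =>
    have h0 : 0 < (x :: xs).length := by simp
    have h := inner_eq ((x :: xs).length - 1) (x :: xs) 0 (by omega) h0 sc 1
    simp only [Nat.cast_zero, zero_add] at h
    rw [h]
    simp only [List.getElem_cons_zero, List.drop_succ_cons, List.drop_zero]
    rw [show (1 : Int) = ((1 : Nat) : Int) by norm_num, lineF_eq_runs]
    simp [lineScore, runLengths]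

-- A's per-line pass, for any index→value access function v agreeing with a concrete line l
theorem lineA_general (n : Nat) (hn : 1 ≤ n) (v : Int → Int) (l : List Int) (hl : l.length = n)
    (hv : ∀ c : Nat, c < n → v (c : Int) = PySem.List.pyGetD l (c : Int) 0) (sc : Int) :
    tailAdd ((PySem.List.pyRange 1 (n : Int) 1).foldl
      (fun (p : Int × Int) c => if v c = v (c - 1) then (p.1, p.2 + 1)
        else ((if p.2 ≥ 5 then p.1 + p.2 - 2 else p.1), 1)) (sc, 1))
      = sc + lineScore l := by
  have hcong := PySem.List.foldl_congr_mem (l := PySem.List.pyRange 1 (n : Int) 1)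
    (init := ((sc, 1) : Int × Int))
    (f := fun (p : Int × Int) c => if v c = v (c - 1) then (p.1, p.2 + 1)
        else ((if p.2 ≥ 5 then p.1 + p.2 - 2 else p.1), 1))
    (g := stepLine l) ?_
  · rw [hcong, show ((n : Int)) = ((l.length : Nat) : Int) by rw [hl]]
    exact line_eq l (by intro h; rw [h] at hl; simp at hl; omega) sc
  · intro acc c hc
    rw [PySem.List.mem_pyRange_one] at hc
    obtain ⟨hc1, hc2⟩ := hc
    lift c to Nat using (by omega : (0:Int) ≤ c) with cn
    have hcn2 : cn < n := by exact_mod_cast hc2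
    have hcn1 : 1 ≤ cn := by exact_mod_cast hc1
    have e1 : v (cn : Int) = PySem.List.pyGetD l (cn : Int) 0 := hv cn hcn2
    have e2 : v ((cn : Int) - 1) = PySem.List.pyGetD l ((cn : Int) - 1) 0 := by
      rw [show ((cn : Int) - 1) = ((cn - 1 : Nat) : Int) by omega]
      exact hv (cn - 1) (by omega)
    simp only [stepLine, e1, e2]

-- ---- B-side: the window scorer, characterised by run lengths ----

-- first five cells equal? (false when fewer than five cells)
def head5 : List Int → Bool
  | a :: b :: c :: d :: e :: _ => a == b && b == c && c == d && d == e
  | _ => false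

-- window score of the rest of a line, given the cell just before it (none at the left edge)
def wsRo : Option Int → List Int → Int
  | _, [] => 0
  | p, x :: xs => (if head5 (x :: xs) = true then (if p ≠ some x then 3 else 1) else 0) + wsRo (some x) xs

-- B's per-line step, abstracted over the line l
def stepW (l : List Int) (sc : Int) (c : Int) : Int :=
  if PySem.List.pyGetD l c 0 = PySem.List.pyGetD l (c + 1) 0
      ∧ PySem.List.pyGetD l (c + 1) 0 = PySem.List.pyGetD l (c + 2) 0
      ∧ PySem.List.pyGetD l (c + 2) 0 = PySem.List.pyGetD l (c + 3) 0
      ∧ PySem.List.pyGetD l (c + 3) 0 = PySem.List.pyGetD l (c + 4) 0 then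
    if c = 0 ∨ PySem.List.pyGetD l (c - 1) 0 ≠ PySem.List.pyGetD l c 0 then sc + 1 + 2 else sc + 1
  else sc

def prevOf (l : List Int) : Nat → Option Int
  | 0 => none
  | k + 1 => some (l.getD k 0)

theorem head5_false_of_short (l : List Int) (h : l.length < 5) : head5 l = false := by
  match l with
  | [] => rfl
  | [_] => rfl
  | [_, _] => rfl
  | [_, _, _] => rfl
  | [_, _, _, _] => rfl
  | _ :: _ :: _ :: _ :: _ :: _ => simp at h; omega

theorem wsRo_short (l : List Int) : ∀ (p : Option Int), l.length < 5 → wsRo p l = 0 := by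
  induction l with
  | nil => intro p _; rfl
  | cons x xs ih =>
    intro p h
    simp only [wsRo, head5_false_of_short _ h]
    rw [ih (some x) (by simp at h ⊢; omega)]
    simp

theorem getD_nat {α : Type} [Inhabited α] (l : List α) (d : α) (k : Nat) (hk : k < l.length) :
    l.getD k d = l[k] := by
  simp [List.getD_eq_getElem?_getD, List.getElem?_eq_getElem hk]

theorem innerB_eq (m : Nat) : ∀ (l : List Int) (k : Nat), l.length - 4 - k = m → ∀ sc : Int,
    (PySem.List.pyRange (k : Int) ((l.length : Int) - 4) 1).foldl (stepW l) sc
      = sc + wsRo (prevOf l k) (l.drop k) := by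
  induction m with
  | zero =>
    intro l k hm sc
    rw [PySem.List.pyRange_one_eq_nil (by omega)]
    rw [wsRo_short _ _ (by simp; omega)]
    simp
  | succ m ih =>
    intro l k hm sc
    have hk4 : k + 4 < l.length := by omega
    rw [PySem.List.pyRange_one_cons (by omega)]
    rw [List.foldl_cons]
    -- expand the window
    have e0 : PySem.List.pyGetD l ((k : Int)) 0 = l[k]'(by omega) := pyGetD_nat l 0 k (by omega)
    have e1 : PySem.List.pyGetD l ((k : Int) + 1) 0 = l[k+1]'(by omega) := by
      rw [show ((k : Int) + 1) = ((k + 1 : Nat) : Int) by push_cast; ring]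
      exact pyGetD_nat l 0 (k+1) (by omega)
    have e2 : PySem.List.pyGetD l ((k : Int) + 2) 0 = l[k+2]'(by omega) := by
      rw [show ((k : Int) + 2) = ((k + 2 : Nat) : Int) by push_cast; ring]
      exact pyGetD_nat l 0 (k+2) (by omega)
    have e3 : PySem.List.pyGetD l ((k : Int) + 3) 0 = l[k+3]'(by omega) := by
      rw [show ((k : Int) + 3) = ((k + 3 : Nat) : Int) by push_cast; ring]
      exact pyGetD_nat l 0 (k+3) (by omega)
    have e4 : PySem.List.pyGetD l ((k : Int) + 4) 0 = l[k+4]'(by omega) := by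
      rw [show ((k : Int) + 4) = ((k + 4 : Nat) : Int) by push_cast; ring]
      exact pyGetD_nat l 0 (k+4) (by omega)
    have hd0 : l.drop k = l[k]'(by omega) :: l.drop (k + 1) := (List.getElem_cons_drop (by omega)).symm
    have hd1 : l.drop (k+1) = l[k+1]'(by omega) :: l.drop (k + 2) := (List.getElem_cons_drop (by omega)).symm
    have hd2 : l.drop (k+2) = l[k+2]'(by omega) :: l.drop (k + 3) := (List.getElem_cons_drop (by omega)).symm
    have hd3 : l.drop (k+3) = l[k+3]'(by omega) :: l.drop (k + 4) := (List.getElem_cons_drop (by omega)).symm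
    have hd4 : l.drop (k+4) = l[k+4]'(by omega) :: l.drop (k + 5) := (List.getElem_cons_drop (by omega)).symm
    have hrec := ih l (k + 1) (by omega) (stepW l sc (k : Int))
    rw [show ((k + 1 : Nat) : Int) = ((k : Int) + 1) by push_cast; ring] at hrec
    rw [hrec]
    -- wsRo one step on l.drop k
    rw [hd0]
    show _ = sc + ((if head5 (l[k]'(by omega) :: l.drop (k+1)) = true
        then (if prevOf l k ≠ some (l[k]'(by omega)) then 3 else 1) else 0)
      + wsRo (some (l[k]'(by omega))) (l.drop (k+1)))
    have hprev1 : prevOf l (k + 1) = some (l[k]'(by omega)) := by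
      simp only [prevOf]
      rw [getD_nat l 0 k (by omega)]
    rw [hprev1]
    have hh5 : (head5 (l[k]'(by omega) :: l.drop (k+1)) = true)
        ↔ (l[k]'(by omega) = l[k+1]'(by omega) ∧ l[k+1]'(by omega) = l[k+2]'(by omega)
            ∧ l[k+2]'(by omega) = l[k+3]'(by omega) ∧ l[k+3]'(by omega) = l[k+4]'(by omega)) := by
      rw [hd1, hd2, hd3, hd4]
      simp [head5, Bool.and_eq_true, and_assoc]
    have hbonus : ((k : Int) = 0 ∨ PySem.List.pyGetD l ((k : Int) - 1) 0 ≠ l[k]'(by omega))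
        ↔ prevOf l k ≠ some (l[k]'(by omega)) := by
      cases k with
      | zero => simp [prevOf]
      | succ s =>
        have hs : ((s + 1 : Nat) : Int) - 1 = ((s : Nat) : Int) := by push_cast; ring
        rw [hs, pyGetD_nat l 0 s (by omega)]
        have hp : prevOf l (s + 1) = some (l[s]'(by omega)) := by
          simp only [prevOf]
          rw [getD_nat l 0 s (by omega)]
        rw [hp]
        constructor
        · intro h
          rcases h with h | h
          · exfalso; omega
          · intro hc; rw [Option.some_inj] at hc; exact h hc
        · intro h
          right
          intro hc
          exact h (by rw [hc])
    simp only [stepW, e0, e1, e2, e3, e4]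
    by_cases hc : (l[k]'(by omega) = l[k+1]'(by omega) ∧ l[k+1]'(by omega) = l[k+2]'(by omega)
            ∧ l[k+2]'(by omega) = l[k+3]'(by omega) ∧ l[k+3]'(by omega) = l[k+4]'(by omega))
    · rw [if_pos hc, if_pos (hh5.mpr hc)]
      by_cases hb : prevOf l k ≠ some (l[k]'(by omega))
      · rw [if_pos (hbonus.mpr hb), if_pos hb]; ring
      · rw [if_neg (fun h => hb (hbonus.mp h)), if_neg hb]; ring
    · rw [if_neg hc, if_neg (fun h => hc (hh5.mp h))]
      ring

-- B's per-line pass, for any accessor v agreeing with a concrete line l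
theorem lineB_general (n : Nat) (v : Int → Int) (l : List Int) (hl : l.length = n)
    (hv : ∀ c : Nat, c < n → v (c : Int) = PySem.List.pyGetD l (c : Int) 0) (sc : Int) :
    (PySem.List.pyRange 0 ((n : Int) - 4) 1).foldl
      (fun score c => if v c = v (c + 1) ∧ v (c + 1) = v (c + 2) ∧ v (c + 2) = v (c + 3) ∧ v (c + 3) = v (c + 4) then
          (if c = 0 ∨ v (c - 1) ≠ v c then score + 1 + 2 else score + 1) else score) sc
      = sc + wsRo none l := by
  have hcong := PySem.List.foldl_congr_mem (l := PySem.List.pyRange 0 ((n : Int) - 4) 1)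
    (init := sc)
    (f := fun score c => if v c = v (c + 1) ∧ v (c + 1) = v (c + 2) ∧ v (c + 2) = v (c + 3) ∧ v (c + 3) = v (c + 4) then
          (if c = 0 ∨ v (c - 1) ≠ v c then score + 1 + 2 else score + 1) else score)
    (g := stepW l) ?_
  · rw [hcong, show ((n : Int) - 4) = ((l.length : Int) - 4) by rw [hl],
      show (0 : Int) = ((0 : Nat) : Int) by norm_num,
      innerB_eq (l.length - 4) l 0 (by omega) sc]
    simp [prevOf]
  · intro acc c hc
    rw [PySem.List.mem_pyRange_one] at hc
    obtain ⟨hc1, hc2⟩ := hc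
    lift c to Nat using hc1 with cn
    have hcn : cn + 4 < n := by omega
    have f0 : v (cn : Int) = PySem.List.pyGetD l (cn : Int) 0 := hv cn (by omega)
    have f1 : v ((cn : Int) + 1) = PySem.List.pyGetD l ((cn : Int) + 1) 0 := by
      rw [show ((cn : Int) + 1) = ((cn + 1 : Nat) : Int) by push_cast; ring]; exact hv (cn+1) (by omega)
    have f2 : v ((cn : Int) + 2) = PySem.List.pyGetD l ((cn : Int) + 2) 0 := by
      rw [show ((cn : Int) + 2) = ((cn + 2 : Nat) : Int) by push_cast; ring]; exact hv (cn+2) (by omega)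
    have f3 : v ((cn : Int) + 3) = PySem.List.pyGetD l ((cn : Int) + 3) 0 := by
      rw [show ((cn : Int) + 3) = ((cn + 3 : Nat) : Int) by push_cast; ring]; exact hv (cn+3) (by omega)
    have f4 : v ((cn : Int) + 4) = PySem.List.pyGetD l ((cn : Int) + 4) 0 := by
      rw [show ((cn : Int) + 4) = ((cn + 4 : Nat) : Int) by push_cast; ring]; exact hv (cn+4) (by omega)
    simp only [stepW, f0, f1, f2, f3, f4]
    -- the bonus test: at c = 0 both disjunctions are true by the left disjunct;
    -- at c ≥ 1 the accessed index c-1 is in range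
    by_cases h0 : (cn : Int) = 0
    · simp [h0]
    · have hcn1 : 1 ≤ cn := by omega
      have fm1 : v ((cn : Int) - 1) = PySem.List.pyGetD l ((cn : Int) - 1) 0 := by
        rw [show ((cn : Int) - 1) = ((cn - 1 : Nat) : Int) by omega]; exact hv (cn-1) (by omega)
      simp only [fm1]

-- ---- window score = run-length score ----

theorem head5_cons₂ (x y : Int) (t : List Int) (h : x ≠ y) : head5 (x :: y :: t) = false := by
  match t with
  | [] => rfl
  | [_] => rfl
  | [_, _] => rfl
  | _ :: _ :: _ :: _ => simp [head5, h]

theorem head5_cons₃ (x y : Int) (t : List Int) (h : x ≠ y) : head5 (x :: x :: y :: t) = false := by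
  match t with
  | [] => rfl
  | [_] => rfl
  | _ :: _ :: _ => simp [head5, h]

theorem head5_cons₄ (x y : Int) (t : List Int) (h : x ≠ y) : head5 (x :: x :: x :: y :: t) = false := by
  match t with
  | [] => rfl
  | _ :: _ => simp [head5, h]

theorem head5_cons₅ (x y : Int) (t : List Int) (h : x ≠ y) : head5 (x :: x :: x :: x :: y :: t) = false := by
  simp [head5, h]

theorem head5_replicate_succ (m : Nat) (x : Int) (d : List Int)
    (hd : ∀ h ∈ d.head?, h ≠ x) : head5 (List.replicate (m + 1) x ++ d) = decide (5 ≤ m + 1) := by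
  match m with
  | 0 | 1 | 2 | 3 =>
    cases d with
    | nil => simp [head5_false_of_short]
    | cons h t =>
      have hne : x ≠ h := fun he => (hd h (by simp)) he.symm
      simp only [List.replicate, List.cons_append, List.nil_append]
      first
      | rw [head5_cons₂ x h t hne] | rw [head5_cons₃ x h t hne]
      | rw [head5_cons₄ x h t hne] | rw [head5_cons₅ x h t hne]
      decide
  | (s + 4) =>
    show head5 (List.replicate (s + 5) x ++ d) = _
    simp only [List.replicate_succ, List.cons_append]
    simp [head5]

theorem wsRo_prev_irrel (x : Int) (l : List Int) (hd : ∀ h ∈ l.head?, h ≠ x) :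
    wsRo (some x) l = wsRo none l := by
  cases l with
  | nil => rfl
  | cons y ys =>
    have : x ≠ y := fun he => (hd y (by simp)) he.symm
    simp [wsRo, this]

theorem wsRo_some_run (x : Int) (d : List Int) (hd : ∀ h ∈ d.head?, h ≠ x) :
    ∀ m : Nat, wsRo (some x) (List.replicate m x ++ d)
      = (if 5 ≤ m then (m : Int) - 4 else 0) + wsRo none d := by
  intro m
  induction m with
  | zero => simp [wsRo_prev_irrel x d hd]
  | succ m ih =>
    rw [List.replicate_succ, List.cons_append]
    show (if head5 (x :: (List.replicate m x ++ d)) = true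
        then (if (some x : Option Int) ≠ some x then 3 else 1) else 0)
      + wsRo (some x) (List.replicate m x ++ d) = _
    rw [show (x :: (List.replicate m x ++ d)) = List.replicate (m + 1) x ++ d by
          rw [List.replicate_succ, List.cons_append]]
    rw [head5_replicate_succ m x d hd, ih]
    simp only [ne_eq, not_true_eq_false, if_false, decide_eq_true_eq]
    generalize wsRo none d = W
    split_ifs <;> push_cast <;> omega

theorem wsRo_run (m : Nat) (x : Int) (d : List Int) (hd : ∀ h ∈ d.head?, h ≠ x) :
    wsRo none (List.replicate (m + 1) x ++ d)
      = (if 5 ≤ m + 1 then ((m : Int) + 1) - 2 else 0) + wsRo none d := by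
  rw [List.replicate_succ, List.cons_append]
  show (if head5 (x :: (List.replicate m x ++ d)) = true
      then (if (none : Option Int) ≠ some x then 3 else 1) else 0)
    + wsRo (some x) (List.replicate m x ++ d) = _
  rw [show (x :: (List.replicate m x ++ d)) = List.replicate (m + 1) x ++ d by
        rw [List.replicate_succ, List.cons_append]]
  rw [head5_replicate_succ m x d hd, wsRo_some_run x d hd m]
  simp only [ne_eq, reduceCtorEq, not_false_eq_true, if_true, decide_eq_true_eq]
  generalize wsRo none d = W
  split_ifs <;> omega

theorem runsGo_spec (xs : List Int) : ∀ (x : Int) (run : Nat),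
    runsGo x run xs = (run + (xs.takeWhile (fun y => y == x)).length) :: runLengths (xs.dropWhile (fun y => y == x)) := by
  induction xs with
  | nil => intro x run; simp [runsGo, runLengths]
  | cons y ys ih =>
    intro x run
    by_cases he : y = x
    · subst he
      simp only [runsGo, List.takeWhile_cons, List.dropWhile_cons, beq_self_eq_true, if_true]
      rw [ih y (run + 1)]
      simp only [List.length_cons]
      congr 1
      omega
    · have hb : (y == x) = false := by simp [he]
      simp only [runsGo, if_neg he, List.takeWhile_cons, List.dropWhile_cons, hb, if_false,
        Bool.false_eq_true, List.length_nil, Nat.add_zero]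
      rfl

theorem head_dropWhile_ne (p : Int → Bool) (xs : List Int) :
    ∀ h ∈ (xs.dropWhile p).head?, p h = false := by
  induction xs with
  | nil => simp
  | cons y ys ih =>
    intro h hh
    rw [List.dropWhile_cons] at hh
    by_cases hp : p y = true
    · rw [if_pos hp] at hh; exact ih h hh
    · rw [if_neg hp] at hh
      simp at hh
      subst hh
      simpa using hp

theorem wsRo_eq_runs (N : Nat) : ∀ l : List Int, l.length ≤ N →
    wsRo none l = (runLengths l).foldl scoreStep 0 := by
  induction N with
  | zero =>
    intro l hl
    have h0 : l = [] := List.length_eq_zero_iff.mp (by omega)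
    subst h0
    rfl
  | succ N ih =>
    intro l hl
    cases l with
    | nil => rfl
    | cons x xs =>
      set t := xs.takeWhile (fun y => y == x) with ht
      set d := xs.dropWhile (fun y => y == x) with hdd
      have htrep : t = List.replicate t.length x := by
        apply List.eq_replicate_of_mem
        intro b hb
        have := List.mem_takeWhile_imp hb
        simpa using this
      have hdec : x :: xs = List.replicate (t.length + 1) x ++ d := by
        rw [List.replicate_succ, List.cons_append, ← htrep]
        rw [ht, hdd]
        simp [List.takeWhile_append_dropWhile]
      have hd : ∀ h ∈ d.head?, h ≠ x := by
        intro h hh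
        have := head_dropWhile_ne (fun y => y == x) xs h hh
        simpa using this
      rw [hdec, wsRo_run t.length x d hd]
      rw [show runLengths (List.replicate (t.length + 1) x ++ d) = runLengths (x :: xs) by rw [hdec]]
      show _ = (runsGo x 1 xs).foldl scoreStep 0
      rw [runsGo_spec xs x 1, List.foldl_cons, foldl_score_shift]
      simp only [← ht, ← hdd]
      have hlen : d.length ≤ N := by
        have h1 := List.length_dropWhile_le (fun y => y == x) xs
        simp only [← hdd] at h1
        simp at hl
        omega
      rw [← ih d hlen]
      simp only [scoreStep]
      generalize wsRo none d = W
      split_ifs <;> push_cast <;> omega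

theorem lineScore_eq_wsRo (l : List Int) : lineScore l = wsRo none l := by
  rw [wsRo_eq_runs l.length l (le_refl _)]
  rfl

-- ---- outer loops: a fold over range 0..n adding one value per index ----

theorem foldl_pyRange_add (n : Nat) (f : Int → Int → Int) (val : Nat → Int)
    (h : ∀ i : Nat, i < n → ∀ sc : Int, f sc (i : Int) = sc + val i) :
    ∀ init : Int, (PySem.List.pyRange 0 (n : Int) 1).foldl f init
      = init + ((List.range n).map val).sum := by
  induction n with
  | zero => intro init; rw [PySem.List.pyRange_one_eq_nil (by omega)]; simp
  | succ n ih =>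
    intro init
    rw [show (((n : Nat) + 1 : Nat) : Int) = ((n : Int) + 1) by push_cast; ring]
    rw [PySem.List.pyRange_one_succ_right (by omega), List.foldl_append, List.foldl_cons, List.foldl_nil]
    rw [ih (fun i hi => h i (by omega)) init]
    rw [h n (by omega)]
    rw [List.range_succ, List.map_append, List.sum_append]
    simp [add_assoc]

-- ===== VERDICT helper: the main proof =====

theorem penalty_eq (matrix : List (List Int)) (size : Int) :
    penalty_py matrix size = penalty_py_alt matrix size := by
  by_cases hs0 : size ≤ 0
  · simp [penalty_py, penalty_py_alt, PySem.List.pyRange_one_eq_nil hs0]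
  · obtain ⟨n, rfl⟩ : ∃ n : Nat, size = (n : Int) := ⟨size.toNat, by omega⟩
    have hn : 1 ≤ n := by omega
    -- per-row / per-column concrete lines
    set rowL : Nat → List Int := fun r => (PySem.List.pyRange 0 ((n : Nat) : Int) 1).map (fun c =>
      PySem.List.pyGetD (PySem.List.pyGetD matrix (r : Int) []) c 0) with hrowL
    set colL : Nat → List Int := fun c => (PySem.List.pyRange 0 ((n : Nat) : Int) 1).map (fun r =>
      PySem.List.pyGetD (PySem.List.pyGetD matrix r []) (c : Int) 0) with hcolL
    have hrowlen : ∀ r, (rowL r).length = n := by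
      intro r; simp [hrowL, PySem.List.length_pyRange_one]
    have hcollen : ∀ c, (colL c).length = n := by
      intro c; simp [hcolL, PySem.List.length_pyRange_one]
    have hrowv : ∀ r : Nat, ∀ c : Nat, c < n →
        PySem.List.pyGetD (PySem.List.pyGetD matrix (r : Int) []) (c : Int) 0
          = PySem.List.pyGetD (rowL r) (c : Int) 0 := by
      intro r c hc
      simp only [hrowL]
      exact (PySem.List.pyGetD_map_pyRange
        (fun c => PySem.List.pyGetD (PySem.List.pyGetD matrix (r : Int) []) c 0) n c 0 hc).symm
    have hcolv : ∀ c : Nat, ∀ r : Nat, r < n →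
        PySem.List.pyGetD (PySem.List.pyGetD matrix (r : Int) []) (c : Int) 0
          = PySem.List.pyGetD (colL c) (r : Int) 0 := by
      intro c r hr
      simp only [hcolL]
      exact (PySem.List.pyGetD_map_pyRange
        (fun r => PySem.List.pyGetD (PySem.List.pyGetD matrix r []) (c : Int) 0) n r 0 hr).symm
    -- A as a sum of line scores
    have hA : penalty_py matrix ((n : Nat) : Int)
        = ((List.range n).map (fun r => lineScore (rowL r))).sum
          + ((List.range n).map (fun c => lineScore (colL c))).sum := by
      show (PySem.List.pyRange 0 ((n : Nat) : Int) 1).foldl _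
          ((PySem.List.pyRange 0 ((n : Nat) : Int) 1).foldl _ 0) = _
      rw [foldl_pyRange_add n _ (fun c => lineScore (colL c)) (fun c hc sc => by
        exact lineA_general n hn (fun r => PySem.List.pyGetD (PySem.List.pyGetD matrix r []) (c : Int) 0)
          (colL c) (hcollen c) (fun r hr => hcolv c r hr) sc)]
      rw [foldl_pyRange_add n _ (fun r => lineScore (rowL r)) (fun r hr sc => by
        exact lineA_general n hn (fun c => PySem.List.pyGetD (PySem.List.pyGetD matrix (r : Int) []) c 0)
          (rowL r) (hrowlen r) (fun c hc => hrowv r c hc) sc)]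
      ring
    -- B as a sum of window scores
    have hB : penalty_py_alt matrix ((n : Nat) : Int)
        = ((List.range n).map (fun r => wsRo none (rowL r))).sum
          + ((List.range n).map (fun c => wsRo none (colL c))).sum := by
      show (PySem.List.pyRange 0 ((n : Nat) : Int) 1).foldl _
          ((PySem.List.pyRange 0 ((n : Nat) : Int) 1).foldl _ 0) = _
      rw [foldl_pyRange_add n _ (fun c => wsRo none (colL c)) (fun c hc sc => by
        exact lineB_general n (fun r => mget matrix r (c : Int))
          (colL c) (hcollen c) (fun r hr => hcolv c r hr) sc)]
      rw [foldl_pyRange_add n _ (fun r => wsRo none (rowL r)) (fun r hr sc => by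
        exact lineB_general n (fun c => mget matrix (r : Int) c)
          (rowL r) (hrowlen r) (fun c hc => hrowv r c hc) sc)]
      ring
    rw [hA, hB]
    congr 1
    · exact congrArg List.sum (List.map_congr_left (fun r _ => lineScore_eq_wsRo (rowL r)))
    · exact congrArg List.sum (List.map_congr_left (fun c _ => lineScore_eq_wsRo (colL c)))

-- ===== VERDICT (by name: the statement is the Claim_ definition above) =====
theorem penalty_py_spec : Claim_equal_penalty_py := by
  intro matrix size _ _
  unfold Spec_penalty_py
  exact penalty_eq matrix size
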